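-- pv_equiv track=rewrite | github.com/g06081507/ProgrammingLab | Modulo1/Esercitazioni_Modulo1/Esercitazione2.py | raggruppoPerAnno
-- ===== SOURCE A (Python) =====
-- def raggruppoPerAnno (lista):
--     dizio = {}
--     for item in lista:
--         items = item.split(",")
--         annoMese = items[0].split("-")
--         value = items[1]
--         anno = annoMese[0]
--         #mese = annoMese[1]
--         if not anno in dizio:
--             dizio[anno]=[]
--         dizio[anno].append(value)
--     return dizio
-- ===== SOURCE B (Python) =====
-- def raggruppoPerAnno(lista):
--     # same row-splitting as the original, but a different decomposition:
--     # build (anno, value) pairs, dedup the years in first-occurrence order,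
--     # then materialize each year's values with one comprehension per year.
--     pairs = []
--     for item in lista:
--         items = item.split(",")
--         pairs.append((items[0].split("-")[0], items[1]))
--     anni = list(dict.fromkeys(anno for anno, _ in pairs))
--     return {anno: [v for a, v in pairs if a == anno] for anno in anni}
-- ===== Notes on version B (the rewrite author's own statement) =====
-- stated objective: alternative
-- what changed: Replaces the single-pass dict-building loop by a three-stage pipeline: extract an (anno, value) pair list, deduplicate the years in first-occurrence order via dict.fromkeys, then build the result with one filtering comprehension per year.
import Mathlib
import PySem

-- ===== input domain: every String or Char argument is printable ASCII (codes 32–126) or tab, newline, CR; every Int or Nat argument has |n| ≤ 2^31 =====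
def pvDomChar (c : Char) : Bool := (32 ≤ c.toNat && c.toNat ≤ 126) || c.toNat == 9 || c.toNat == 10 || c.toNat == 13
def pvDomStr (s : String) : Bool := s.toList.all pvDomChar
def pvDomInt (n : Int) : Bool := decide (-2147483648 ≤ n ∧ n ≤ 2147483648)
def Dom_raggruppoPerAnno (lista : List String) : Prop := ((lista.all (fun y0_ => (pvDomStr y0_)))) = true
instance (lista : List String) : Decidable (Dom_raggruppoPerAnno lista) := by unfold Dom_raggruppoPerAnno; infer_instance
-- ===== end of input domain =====

-- B replaces A's single-pass dict-building loop by a pair-extraction / year-dedup / per-year-filter pipeline (alternative decomposition, same results).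


-- ===== PORT A =====
def raggruppoPerAnno (lista : List String) : List (String × List String) :=
  (lista.foldl (fun dizio item =>
    let items := (PySem.Str.split? item ",").getD []
    let annoMese := (PySem.Str.split? ((PySem.List.pyGet? items 0).getD "") "-").getD []
    let value := (PySem.List.pyGet? items 1).getD ""   -- items[1]; Pre_ guarantees it exists
    let anno := (PySem.List.pyGet? annoMese 0).getD ""
    let dizio := if dizio.contains anno then dizio else dizio.insert anno []
    dizio.modify anno [] (fun l => l ++ [value])       -- dizio[anno].append(value)
  ) PySem.Dict.empty).items

-- ===== PORT B =====
def raggruppoPerAnno_alt (lista : List String) : List (String × List String) :=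
  let pairs := lista.map (fun item =>
    let items := (PySem.Str.split? item ",").getD []
    ((PySem.List.pyGet? ((PySem.Str.split? ((PySem.List.pyGet? items 0).getD "") "-").getD []) 0).getD "",
     (PySem.List.pyGet? items 1).getD ""))
  let anni := PySem.List.dedup (pairs.map (fun p => p.1))   -- list(dict.fromkeys(...))
  anni.map (fun a => (a, (pairs.filter (fun p => p.1 == a)).map (fun p => p.2)))

-- ===== PRECONDITION & SPEC =====
-- Pre_ excludes exactly the rows without a ',' — there Python A raises IndexError on items[1] (and B raises identically).
def Pre_raggruppoPerAnno (lista : List String) : Prop := ∀ item ∈ lista, PySem.Str.isIn "," item = true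
instance (lista : List String) : Decidable (Pre_raggruppoPerAnno lista) := by unfold Pre_raggruppoPerAnno; infer_instance
def pvWitness_raggruppoPerAnno : List String := ["2020-01,a", "2021-02,b", "2020-03,c"]
def Spec_raggruppoPerAnno (lista : List String) (out : List (String × List String)) : Prop := out = raggruppoPerAnno_alt lista
instance (lista : List String) (out : List (String × List String)) : Decidable (Spec_raggruppoPerAnno lista out) := by unfold Spec_raggruppoPerAnno; infer_instance

-- ===== CLAIM (what is proved, stated in full; the proofs are below) =====
def Claim_equal_raggruppoPerAnno : Prop := ∀ (lista : List String), Dom_raggruppoPerAnno lista → Pre_raggruppoPerAnno lista → Spec_raggruppoPerAnno lista (raggruppoPerAnno lista)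

-- ===== LEMMAS AND PROOFS =====

/-- The (anno, value) extraction both programs perform on one row. -/
def pvKeyVal (item : String) : String × String :=
  let items := (PySem.Str.split? item ",").getD []
  ((PySem.List.pyGet? ((PySem.Str.split? ((PySem.List.pyGet? items 0).getD "") "-").getD []) 0).getD "",
   (PySem.List.pyGet? items 1).getD "")

/-- B's pipeline, with the shared row extraction named. -/
theorem pv_alt_eq (lista : List String) :
    raggruppoPerAnno_alt lista =
      (PySem.List.dedup ((lista.map pvKeyVal).map (fun p => p.1))).map
        (fun a => (a, ((lista.map pvKeyVal).filter (fun p => p.1 == a)).map (fun p => p.2))) := rfl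

/-- A's "ensure key then append" step is a single modify. -/
theorem pv_step_eq (d : PySem.Dict String (List String)) (k : String) (v : String) :
    (if d.contains k then d else d.insert k []).modify k [] (fun l => l ++ [v])
      = d.modify k [] (fun l => l ++ [v]) := by
  by_cases h : d.contains k = true
  · simp [h]
  · rw [if_neg h]
    have hc : d.contains k = false := by simpa using h
    rw [PySem.Dict.modify, PySem.Dict.modify, PySem.Dict.getD_insert_self,
      PySem.Dict.insert_insert_self, PySem.Dict.getD_of_not_contains d [] hc]

set_option maxHeartbeats 1600000 in
theorem pv_foldA_eq (lista : List String) :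
    raggruppoPerAnno lista =
      ((lista.map pvKeyVal).foldl
        (fun d p => d.modify p.1 [] (fun l => l ++ [p.2])) PySem.Dict.empty).items := by
  unfold raggruppoPerAnno
  rw [List.foldl_map]
  congr 1
  apply PySem.List.foldl_congr_mem
  intro d item _
  show (if d.contains ((pvKeyVal item).1) then d else d.insert ((pvKeyVal item).1) []).modify
      ((pvKeyVal item).1) [] (fun l => l ++ [(pvKeyVal item).2])
    = d.modify ((pvKeyVal item).1) [] (fun l => l ++ [(pvKeyVal item).2])
  exact pv_step_eq d (pvKeyVal item).1 (pvKeyVal item).2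

theorem raggruppoPerAnno_spec' (lista : List String) :
    raggruppoPerAnno lista = raggruppoPerAnno_alt lista := by
  rw [pv_foldA_eq, pv_alt_eq]
  set P := lista.map pvKeyVal with hP
  set D := P.foldl (fun d p => d.modify p.1 [] (fun l => l ++ [p.2])) PySem.Dict.empty with hD
  have hnd : D.keys.Nodup := by
    rw [hD]
    exact PySem.Dict.nodup_keys_foldl_modify_key P Prod.fst [] (fun _ p l => l ++ [p.2]) _
      (by simp [PySem.Dict.keys_empty])
  have hkeys : D.keys = PySem.Set.ofList (P.map (fun p => p.1)) := by
    rw [hD]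
    rw [PySem.Dict.keys_foldl_modify_key P Prod.fst [] (fun _ p l => l ++ [p.2])]
    simp [PySem.Dict.keys_empty, PySem.Set.update_nil_left]
  rw [PySem.Dict.items_eq_map_keys D hnd [], hkeys, PySem.List.dedup_eq_ofList]
  apply List.map_congr_left
  intro a _
  simp only [hD, PySem.Dict.getD_foldl_modify_append, PySem.Dict.getD_empty, List.nil_append]

-- ===== VERDICT (by name: the statement is the Claim_ definition above) =====
theorem raggruppoPerAnno_spec : Claim_equal_raggruppoPerAnno := by
  intro lista _ _
  exact raggruppoPerAnno_spec' lista
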